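-- pv_equiv track=rewrite | github.com/Nopom/difflib_docx | contractReviewRobot/compareWorks.py | cdl2diff
-- ===== SOURCE A (Python) =====
-- def cdl2diff(cdl):
--
--     diff_doc1 = {}
--     diff_doc2 = {}
--     for (i, v), n in zip(cdl.items(), range(len(cdl))):
--         if n % 2 == 0:
--             diff_doc1[i] = v
--         else:
--             diff_doc2[i] = v
--     return diff_doc1,diff_doc2
-- ===== SOURCE B (Python) =====
-- def cdl2diff(cdl):
--     items = list(cdl.items())
--     return dict(items[::2]), dict(items[1::2])
-- ===== Notes on version B (the rewrite author's own statement) =====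
-- stated objective: idiomatic
-- what changed: Replaces the counter-and-modulo branching loop by materializing the items once and building the two dicts from stride slices items[::2] and items[1::2].
import Mathlib
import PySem

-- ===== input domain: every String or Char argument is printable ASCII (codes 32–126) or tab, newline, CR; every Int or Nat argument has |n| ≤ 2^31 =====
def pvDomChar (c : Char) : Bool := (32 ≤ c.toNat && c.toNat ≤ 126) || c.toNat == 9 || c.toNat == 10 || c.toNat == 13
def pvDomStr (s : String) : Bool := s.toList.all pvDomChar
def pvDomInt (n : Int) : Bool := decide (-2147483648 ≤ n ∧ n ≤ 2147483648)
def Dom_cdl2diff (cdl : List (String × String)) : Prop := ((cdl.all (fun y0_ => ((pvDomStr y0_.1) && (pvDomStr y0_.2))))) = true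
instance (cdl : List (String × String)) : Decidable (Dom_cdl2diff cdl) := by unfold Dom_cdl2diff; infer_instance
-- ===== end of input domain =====

-- B replaces A's counter-and-parity loop with two stride slices of the item list (idiomatic, same cost).

-- ===== PORT A =====
-- the 'for (i, v), n in zip(cdl.items(), range(len(cdl)))' loop, with its parity branch
def cdl2diffLoop (xs : List (String × String)) (n : Nat)
    (d1 d2 : PySem.Dict String String) :
    PySem.Dict String String × PySem.Dict String String :=
  match xs with
  | [] => (d1, d2)
  | (i, v) :: rest =>
    if n % 2 == 0 then cdl2diffLoop rest (n + 1) (d1.insert i v) d2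
    else cdl2diffLoop rest (n + 1) d1 (d2.insert i v)

def cdl2diff (cdl : List (String × String)) :
    (List (String × String)) × (List (String × String)) :=
  let r := cdl2diffLoop cdl 0 PySem.Dict.empty PySem.Dict.empty
  (r.1.items, r.2.items)

-- ===== PORT B =====
-- dict(pairs)
def pvDictOf (l : List (String × String)) : PySem.Dict String String :=
  l.foldl (fun d kv => d.insert kv.1 kv.2) PySem.Dict.empty

def cdl2diff_alt (cdl : List (String × String)) :
    (List (String × String)) × (List (String × String)) :=
  let items := cdl
  let diff_doc1 := pvDictOf ((PySem.List.slice? items none none 2).getD [])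
  let diff_doc2 := pvDictOf ((PySem.List.slice? items (some 1) none 2).getD [])
  (diff_doc1.items, diff_doc2.items)

-- ===== PRECONDITION & SPEC =====
def Spec_cdl2diff (cdl : List (String × String)) (out : (List (String × String)) × (List (String × String))) : Prop := out = cdl2diff_alt cdl
instance (cdl : List (String × String)) (out : (List (String × String)) × (List (String × String))) : Decidable (Spec_cdl2diff cdl out) := by unfold Spec_cdl2diff; infer_instance

-- ===== CLAIM (what is proved, stated in full; the proofs are below) =====
def Claim_equal_cdl2diff : Prop := ∀ (cdl : List (String × String)), Dom_cdl2diff cdl → Spec_cdl2diff cdl (cdl2diff cdl)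

-- ===== LEMMAS AND PROOFS =====

-- elements at even indices
def pvTakeEven {α : Type} : List α → List α
  | [] => []
  | [x] => [x]
  | x :: _ :: t => x :: pvTakeEven t

theorem pvTakeEven_cons {α : Type} (x : α) (t : List α) :
    pvTakeEven (x :: t) = x :: pvTakeEven t.tail := by
  cases t <;> simp [pvTakeEven]

theorem pv_filterMap_even {α : Type} (xs : List α) :
    List.filterMap (fun k => xs[2 * k]?) (List.range ((xs.length + 1) / 2)) = pvTakeEven xs := by
  induction xs using pvTakeEven.induct with
  | case1 => simp [pvTakeEven]
  | case2 x => simp [pvTakeEven, List.range_succ]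
  | case3 x y t ih =>
    have hlen : ((x :: y :: t).length + 1) / 2 = (t.length + 1) / 2 + 1 := by
      simp only [List.length_cons]; omega
    rw [hlen, List.range_succ_eq_map, List.filterMap_cons, List.filterMap_map]
    simp only [List.getElem?_cons_zero, Nat.mul_zero, Function.comp]
    have harg : ∀ k : Nat, (x :: y :: t)[2 * (k + 1)]? = t[2 * k]? := by
      intro k
      have : 2 * (k + 1) = 2 * k + 1 + 1 := by omega
      rw [this]
      simp
    simp only [harg, ih, pvTakeEven]

theorem pv_slice?_even {α : Type} (xs : List α) :
    PySem.List.slice? xs none none 2 = some (pvTakeEven xs) := by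
  rw [show (2 : Int) = ((2 : Nat) : Int) by norm_num]
  simp only [PySem.List.slice?, PySem.List.sliceIndices]
  norm_num
  rw [show (if 0 < xs.length then (((xs.length : Int) + 2 - 1) / 2).toNat else 0)
      = (xs.length + 1) / 2 from by split_ifs <;> omega]
  rw [← pv_filterMap_even xs]
  apply List.filterMap_congr
  intro k _
  rw [show ((2 : Int) * (k : Int)).toNat = 2 * k from by omega]

theorem pv_slice?_odd {α : Type} (xs : List α) :
    PySem.List.slice? xs (some 1) none 2 = some (pvTakeEven xs.tail) := by
  rw [show (2 : Int) = ((2 : Nat) : Int) by norm_num]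
  cases xs with
  | nil => simp [PySem.List.slice?, PySem.List.sliceIndices, pvTakeEven]
  | cons x t =>
    simp only [PySem.List.slice?, PySem.List.sliceIndices]
    norm_num
    rw [show (if 0 < t.length then (((t.length : Int) + 2 - 1) / 2).toNat else 0)
        = (t.length + 1) / 2 from by split_ifs <;> omega]
    rw [← pv_filterMap_even t]
    apply List.filterMap_congr
    intro k _
    rw [show ((1 : Int) + 2 * (k : Int)).toNat = 2 * k + 1 from by omega]
    simp

-- fold-insert of a pair list into a dict, starting from d
def pvInsAll (d : PySem.Dict String String) (l : List (String × String)) : PySem.Dict String String :=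
  l.foldl (fun d kv => d.insert kv.1 kv.2) d

theorem pvInsAll_cons (d : PySem.Dict String String) (kv : String × String) (l : List (String × String)) :
    pvInsAll d (kv :: l) = pvInsAll (d.insert kv.1 kv.2) l := rfl

theorem cdl2diffLoop_eq (xs : List (String × String)) :
    ∀ (n : Nat) (d1 d2 : PySem.Dict String String),
    cdl2diffLoop xs n d1 d2 =
      if n % 2 = 0 then (pvInsAll d1 (pvTakeEven xs), pvInsAll d2 (pvTakeEven xs.tail))
      else (pvInsAll d1 (pvTakeEven xs.tail), pvInsAll d2 (pvTakeEven xs)) := by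
  induction xs with
  | nil =>
    intro n d1 d2
    simp [cdl2diffLoop, pvTakeEven, pvInsAll]
  | cons hd rest ih =>
    intro n d1 d2
    obtain ⟨i, v⟩ := hd
    rw [show cdl2diffLoop ((i, v) :: rest) n d1 d2 =
        (if n % 2 == 0 then cdl2diffLoop rest (n + 1) (d1.insert i v) d2
         else cdl2diffLoop rest (n + 1) d1 (d2.insert i v)) from rfl]
    rw [pvTakeEven_cons, List.tail_cons]
    by_cases h : n % 2 = 0
    · have h1 : (n + 1) % 2 ≠ 0 := by omega
      simp [h, h1, ih, pvInsAll_cons]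
    · have h1 : (n + 1) % 2 = 0 := by omega
      simp [h, h1, ih, pvInsAll_cons]

-- ===== VERDICT (by name: the statement is the Claim_ definition above) =====
theorem cdl2diff_spec : Claim_equal_cdl2diff := by
  intro cdl _
  show cdl2diff cdl = cdl2diff_alt cdl
  simp only [cdl2diff, cdl2diff_alt, cdl2diffLoop_eq, pv_slice?_even, pv_slice?_odd,
    Option.getD_some, Nat.zero_mod]
  rfl
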